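-- pv_equiv track=rewrite | github.com/raja-ahmed-isms/coreform-hugo-site | generate_rel_notes.py | get_pagination_link
-- ===== SOURCE A (Python) =====
-- def get_pagination_link(headers):
--     if "Link" in headers:
--         comma_splits = headers["Link"].split(",")
--         for comma_split in comma_splits:
--             if 'rel="next"' in comma_split:
--                 semi_splits = comma_split.split(";")
--                 # Remove whitespace and <> brackets
--                 return semi_splits[0].strip()[1:-1]
--     else:
--         return None
-- ===== SOURCE B (Python) =====
-- def get_pagination_link(headers):
--     if "Link" not in headers:
--         return None
--     # Build a rel -> URL map over the standard pagination rels, keeping the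
--     # first URL seen for each rel, then look up the "next" link.
--     links = {}
--     for seg in headers["Link"].split(","):
--         url = seg.split(";")[0].strip()[1:-1]
--         for rel in ("first", "prev", "next", "last"):
--             if 'rel="%s"' % rel in seg:
--                 links.setdefault(rel, url)
--     return links.get("next")
-- ===== Notes on version B (the rewrite author's own statement) =====
-- stated objective: alternative
-- what changed: Instead of A's early-return scan for the one matching segment, B makes one pass building a rel->URL dictionary over the standard pagination rels (setdefault keeps the first URL per rel) and then returns links.get('next').
import Mathlib
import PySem

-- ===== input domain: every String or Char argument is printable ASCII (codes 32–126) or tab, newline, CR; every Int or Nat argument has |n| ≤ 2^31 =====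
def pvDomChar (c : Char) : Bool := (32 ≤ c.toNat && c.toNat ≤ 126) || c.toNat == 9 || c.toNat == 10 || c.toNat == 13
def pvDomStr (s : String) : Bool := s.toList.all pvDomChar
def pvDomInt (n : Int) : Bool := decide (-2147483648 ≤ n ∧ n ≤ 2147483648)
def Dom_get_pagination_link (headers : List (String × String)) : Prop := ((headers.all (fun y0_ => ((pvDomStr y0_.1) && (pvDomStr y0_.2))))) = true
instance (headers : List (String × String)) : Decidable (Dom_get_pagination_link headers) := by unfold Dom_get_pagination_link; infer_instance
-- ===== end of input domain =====

-- B builds a rel -> URL map (first occurrence kept) and looks up "next", instead of A's early-return scan; same value everywhere.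

-- ===== PORT A =====
-- semi_splits[0].strip()[1:-1] for one comma segment
def pvExtractA (seg : String) : String :=
  PySem.Str.slice (PySem.Str.strip ((((PySem.Str.split? seg ";").getD [])[0]?).getD "")) (some 1) (some (-1))

-- the for-loop with early return
def pvLoopA : List String → Option String
  | [] => none
  | seg :: rest =>
      if PySem.Str.isIn "rel=\"next\"" seg then some (pvExtractA seg) else pvLoopA rest

def get_pagination_link (headers : List (String × String)) : Option String :=
  match headers.lookup "Link" with
  | some link => pvLoopA ((PySem.Str.split? link ",").getD [])
  | none => none

-- ===== PORT B =====
-- one comma segment: links.setdefault(rel, url) for each matching rel of the fixed vocabulary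
def pvStepB (d : PySem.Dict String String) (seg : String) : PySem.Dict String String :=
  let url := PySem.Str.slice (PySem.Str.strip ((((PySem.Str.split? seg ";").getD [])[0]?).getD "")) (some 1) (some (-1))
  ["first", "prev", "next", "last"].foldl
    (fun d rel => if PySem.Str.isIn ("rel=\"" ++ rel ++ "\"") seg then d.setdefault rel url else d) d

def get_pagination_link_alt (headers : List (String × String)) : Option String :=
  match headers.lookup "Link" with
  | none => none
  | some link =>
      (((PySem.Str.split? link ",").getD []).foldl pvStepB PySem.Dict.empty).get? "next"

-- ===== PRECONDITION & SPEC =====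
def Spec_get_pagination_link (headers : List (String × String)) (out : Option String) : Prop := out = get_pagination_link_alt headers
instance (headers : List (String × String)) (out : Option String) : Decidable (Spec_get_pagination_link headers out) := by unfold Spec_get_pagination_link; infer_instance

-- ===== CLAIM (what is proved, stated in full; the proofs are below) =====
def Claim_equal_get_pagination_link : Prop := ∀ (headers : List (String × String)), Dom_get_pagination_link headers → Spec_get_pagination_link headers (get_pagination_link headers)

-- ===== LEMMAS AND PROOFS =====
-- one segment only affects the "next" lookup through the 'rel="next"' branch
theorem get?_next_pvStepB (d : PySem.Dict String String) (seg : String) :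
    (pvStepB d seg).get? "next" =
      if PySem.Str.isIn "rel=\"next\"" seg
        then some ((d.get? "next").getD (pvExtractA seg))
        else d.get? "next" := by
  simp only [pvStepB, pvExtractA, List.foldl,
    show ("rel=\"" ++ "first" ++ "\"" : String) = "rel=\"first\"" from rfl,
    show ("rel=\"" ++ "prev" ++ "\"" : String) = "rel=\"prev\"" from rfl,
    show ("rel=\"" ++ "next" ++ "\"" : String) = "rel=\"next\"" from rfl,
    show ("rel=\"" ++ "last" ++ "\"" : String) = "rel=\"last\"" from rfl]
  split_ifs <;>
    first
      | rfl
      | simp [PySem.Dict.get?_setdefault_self,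
              PySem.Dict.get?_setdefault_of_ne _ _ (by decide : ("next" : String) ≠ "first"),
              PySem.Dict.get?_setdefault_of_ne _ _ (by decide : ("next" : String) ≠ "prev"),
              PySem.Dict.get?_setdefault_of_ne _ _ (by decide : ("next" : String) ≠ "last")]

-- the dict fold's "next" entry is the initial one, else A's first-match scan
theorem foldl_pvStepB_get?_next (segs : List String) (d : PySem.Dict String String) :
    (segs.foldl pvStepB d).get? "next" = (d.get? "next").or (pvLoopA segs) := by
  induction segs generalizing d with
  | nil => simp [pvLoopA]
  | cons seg rest ih =>
      simp only [List.foldl_cons, ih, get?_next_pvStepB, pvLoopA]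
      split_ifs
      · cases d.get? "next" <;> simp
      · rfl

-- ===== VERDICT (by name: the statement is the Claim_ definition above) =====
theorem get_pagination_link_spec : Claim_equal_get_pagination_link := by
  intro headers _
  unfold Spec_get_pagination_link get_pagination_link get_pagination_link_alt
  cases headers.lookup "Link" with
  | none => rfl
  | some link =>
      simp only [foldl_pvStepB_get?_next,
        show (PySem.Dict.empty : PySem.Dict String String).get? "next" = none from rfl,
        Option.or]
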